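-- pv_equiv track=rewrite | github.com/jwtrhs/advent-of-code | 2025/01/main.py | _count_zeros_clicks
-- ===== SOURCE A (Python) =====
-- def _count_zeros_clicks(input_: list[tuple[str, int]]) -> int:
--     count = 0
--     position = 50
--     for direction, distance in input_:
--         for _ in range(0, abs(distance)):
--             if direction == "R":
--                 position += 1
--             else:
--                 position -= 1
--             position = position % 100
--             if position == 0:
--                 count += 1
--     return count
-- ===== SOURCE B (Python) =====
-- def _count_zeros_clicks(input_: list[tuple[str, int]]) -> int:
--     # O(1) per instruction: count multiples-of-100 crossings of the whole run arithmetically.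
--     count = 0
--     position = 50
--     for direction, distance in input_:
--         k = abs(distance)
--         if direction == "R":
--             count += (position + k) // 100
--             position = (position + k) % 100
--         else:
--             count += (k + (100 - position) % 100) // 100
--             position = (position - k) % 100
--     return count
-- ===== Notes on version B (the rewrite author's own statement) =====
-- stated objective: faster
-- what changed: Replaces the unit-step inner loop over abs(distance) with a closed-form count of multiples-of-100 crossings per instruction ((position+k)//100 up, (k+(100-position)%100)//100 down), O(1) per instruction.
import Mathlib
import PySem

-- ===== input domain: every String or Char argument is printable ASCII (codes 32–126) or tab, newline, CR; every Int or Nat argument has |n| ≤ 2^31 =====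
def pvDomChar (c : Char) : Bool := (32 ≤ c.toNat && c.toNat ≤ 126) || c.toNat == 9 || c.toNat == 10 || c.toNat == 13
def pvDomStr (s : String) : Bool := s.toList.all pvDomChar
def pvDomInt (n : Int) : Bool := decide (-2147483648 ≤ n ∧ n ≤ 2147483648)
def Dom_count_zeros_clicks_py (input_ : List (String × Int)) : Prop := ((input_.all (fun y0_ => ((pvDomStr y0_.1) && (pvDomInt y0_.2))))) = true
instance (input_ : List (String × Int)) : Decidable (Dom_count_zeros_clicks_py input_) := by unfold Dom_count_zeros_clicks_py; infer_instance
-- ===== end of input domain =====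

-- B replaces A's unit-step inner loop with a closed-form crossing count per instruction (O(1) per instruction).


-- ===== PORT A =====
-- one unit step of A's inner loop: move, wrap mod 100, count a hit of 0
def pvStepA (direction : String) (st : Int × Int) : Int × Int :=
  let position := if direction == "R" then st.2 + 1 else st.2 - 1
  let position := PySem.Int.mod position 100
  (if position == 0 then st.1 + 1 else st.1, position)

def count_zeros_clicks_py (input_ : List (String × Int)) : Int :=
  (input_.foldl
    (fun st dd =>
      (PySem.List.pyRange 0 |dd.2| 1).foldl (fun st2 _ => pvStepA dd.1 st2) st)
    (0, 50)).1

-- ===== PORT B =====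
-- whole instruction at once: closed-form number of crossings of a multiple of 100
def pvStepB (direction : String) (k : Int) (st : Int × Int) : Int × Int :=
  if direction == "R" then
    (st.1 + PySem.Int.floordiv (st.2 + k) 100, PySem.Int.mod (st.2 + k) 100)
  else
    (st.1 + PySem.Int.floordiv (k + PySem.Int.mod (100 - st.2) 100) 100,
     PySem.Int.mod (st.2 - k) 100)

def count_zeros_clicks_py_alt (input_ : List (String × Int)) : Int :=
  (input_.foldl (fun st dd => pvStepB dd.1 |dd.2| st) (0, 50)).1

-- ===== PRECONDITION & SPEC =====
def Spec_count_zeros_clicks_py (input_ : List (String × Int)) (out : Int) : Prop := out = count_zeros_clicks_py_alt input_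
instance (input_ : List (String × Int)) (out : Int) : Decidable (Spec_count_zeros_clicks_py input_ out) := by unfold Spec_count_zeros_clicks_py; infer_instance

-- ===== CLAIM (what is proved, stated in full; the proofs are below) =====
def Claim_equal_count_zeros_clicks_py : Prop := ∀ (input_ : List (String × Int)), Dom_count_zeros_clicks_py input_ → Spec_count_zeros_clicks_py input_ (count_zeros_clicks_py input_)

-- ===== LEMMAS AND PROOFS =====

-- a fold whose body ignores the elements is an iterate of the step
theorem pv_foldl_ignore {α β : Type} (g : α → α) (s : α) (l : List β) :
    l.foldl (fun s _ => g s) s = g^[l.length] s := by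
  induction l generalizing s with
  | nil => rfl
  | cons x xs ih => simp [List.foldl, ih, Function.iterate_succ_apply]

theorem pv_stepA_up (direction : String) (h : (direction == "R") = true) :
    ∀ (n : Nat) (c p : Int), 0 ≤ p → p < 100 →
      (pvStepA direction)^[n] (c, p) = (c + (p + (n : Int)) / 100, (p + (n : Int)) % 100) := by
  intro n
  induction n with
  | zero => intro c p h0 h1; simp; omega
  | succ m ih =>
    intro c p h0 h1
    rw [Function.iterate_succ_apply]
    have hstep : pvStepA direction (c, p) =
        (if (p + 1) % 100 = 0 then c + 1 else c, (p + 1) % 100) := by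
      simp [pvStepA, h]
    rw [hstep]
    rw [ih _ _ (by omega) (by omega)]
    rw [Prod.mk.injEq]
    constructor <;> push_cast <;> (try split_ifs) <;> omega

theorem pv_stepA_down (direction : String) (h : (direction == "R") = false) :
    ∀ (n : Nat) (c p : Int), 0 ≤ p → p < 100 →
      (pvStepA direction)^[n] (c, p) =
        (c + ((n : Int) + (100 - p) % 100) / 100, (p - (n : Int)) % 100) := by
  intro n
  induction n with
  | zero => intro c p h0 h1; simp; constructor <;> omega
  | succ m ih =>
    intro c p h0 h1
    rw [Function.iterate_succ_apply]
    have hstep : pvStepA direction (c, p) =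
        (if (p - 1) % 100 = 0 then c + 1 else c, (p - 1) % 100) := by
      simp [pvStepA, h]
    rw [hstep]
    rw [ih _ _ (by omega) (by omega)]
    rw [Prod.mk.injEq]
    constructor <;> push_cast <;> (try split_ifs) <;> omega

theorem pv_main (l : List (String × Int)) :
    ∀ (c p : Int), 0 ≤ p → p < 100 →
      (l.foldl
        (fun st dd =>
          (PySem.List.pyRange 0 |dd.2| 1).foldl (fun st2 _ => pvStepA dd.1 st2) st)
        (c, p)).1
      = (l.foldl (fun st dd => pvStepB dd.1 |dd.2| st) (c, p)).1 := by
  induction l with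
  | nil => intro c p h0 h1; rfl
  | cons dd rest ih =>
    intro c p h0 h1
    simp only [List.foldl]
    have hlen : (PySem.List.pyRange 0 |dd.2| 1).length = (|dd.2|).toNat := by
      rw [PySem.List.length_pyRange_one]; omega
    rw [pv_foldl_ignore (pvStepA dd.1) (c, p), hlen]
    have hcast : ((|dd.2|).toNat : Int) = |dd.2| := Int.toNat_of_nonneg (abs_nonneg _)
    have hmodpos : (0:Int) < 100 := by norm_num
    by_cases hdir : (dd.1 == "R") = true
    · rw [pv_stepA_up dd.1 hdir _ c p h0 h1, hcast]
      have hB : pvStepB dd.1 |dd.2| (c, p) =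
          (c + (p + |dd.2|) / 100, (p + |dd.2|) % 100) := by
        simp [pvStepB, hdir]
      rw [hB]
      exact ih _ _ (Int.emod_nonneg _ (by norm_num)) (Int.emod_lt_of_pos _ hmodpos)
    · rw [pv_stepA_down dd.1 (by simpa using hdir) _ c p h0 h1, hcast]
      have hB : pvStepB dd.1 |dd.2| (c, p) =
          (c + (|dd.2| + (100 - p) % 100) / 100, (p - |dd.2|) % 100) := by
        simp [pvStepB, hdir]
      rw [hB]
      exact ih _ _ (Int.emod_nonneg _ (by norm_num)) (Int.emod_lt_of_pos _ hmodpos)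

-- ===== VERDICT (by name: the statement is the Claim_ definition above) =====
theorem count_zeros_clicks_py_spec : Claim_equal_count_zeros_clicks_py := by
  intro input_ _
  unfold Spec_count_zeros_clicks_py count_zeros_clicks_py count_zeros_clicks_py_alt
  exact pv_main input_ 0 50 (by norm_num) (by norm_num)
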